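-- pv_equiv track=rewrite | github.com/piotrhelm/NESTFUL | data_v2/executable_functions/py_code_file_2559.py | replace_with_lengths
-- ===== SOURCE A (Python) =====
-- from typing import Dict
--
-- def replace_with_lengths(dictionary: Dict[str, Dict[str, str]]) -> Dict[str, Dict[str, int]]:
--
--     """Replaces the values in a dictionary with their lengths.
--
--     If the value is not a dictionary, its length is set to 1.
--
--     Args:
--
--         dictionary: The input dictionary.
--
--     Returns:
--
--         A dictionary with the same structure as the input dictionary, but with the values replaced by their lengths.
--
--     """
--
--     result = {}
--
--     for key, value in dictionary.items():
--
--         if isinstance(value, dict):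
--
--             result[key] = replace_with_lengths(value)
--
--         else:
--
--             result[key] = 1
--
--     return result
-- ===== SOURCE B (Python) =====
-- from typing import Dict
--
-- def replace_with_lengths(dictionary: Dict[str, Dict[str, str]]) -> Dict[str, Dict[str, int]]:
--     """Non-recursive: for the declared type every value is a dict of strings,
--     so the result is a nested dict comprehension mapping each leaf to 1."""
--     return {key: {inner_key: 1 for inner_key in value} for key, value in dictionary.items()}
-- ===== Notes on version B (the rewrite author's own statement) =====
-- stated objective: simpler
-- what changed: Replaces A's recursion with isinstance dispatch and explicit result-dict assignment loops by a single non-recursive nested dict comprehension, exploiting that the declared input type has exactly two levels.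
import Mathlib
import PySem

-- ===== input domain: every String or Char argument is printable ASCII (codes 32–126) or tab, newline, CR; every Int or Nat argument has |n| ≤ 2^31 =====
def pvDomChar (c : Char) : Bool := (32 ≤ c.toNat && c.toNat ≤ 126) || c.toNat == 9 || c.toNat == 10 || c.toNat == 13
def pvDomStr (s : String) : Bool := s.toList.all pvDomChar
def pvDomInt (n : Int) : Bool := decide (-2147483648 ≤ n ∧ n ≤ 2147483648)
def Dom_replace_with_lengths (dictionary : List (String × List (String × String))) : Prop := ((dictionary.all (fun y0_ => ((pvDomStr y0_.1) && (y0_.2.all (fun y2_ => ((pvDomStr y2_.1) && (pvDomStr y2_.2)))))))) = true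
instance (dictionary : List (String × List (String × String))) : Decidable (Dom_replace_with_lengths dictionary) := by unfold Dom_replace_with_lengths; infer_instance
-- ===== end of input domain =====

-- B replaces A's recursion + assignment loops by one non-recursive nested dict
-- comprehension (simpler); return-value equivalence only, neither mutates its argument.

-- ===== PORT A =====
-- A's recursive call on an inner value: there every value is a str (not a dict),
-- so the loop takes the `else` branch and assigns 1.
def rwl_inner (value : List (String × String)) : List (String × Int) :=
  (value.foldl (fun (r : PySem.Dict String Int) kv => r.insert kv.1 1) PySem.Dict.empty).items

def replace_with_lengths (dictionary : List (String × List (String × String))) : List (String × List (String × Int)) :=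
  (dictionary.foldl (fun (r : PySem.Dict String (List (String × Int))) kv => r.insert kv.1 (rwl_inner kv.2)) PySem.Dict.empty).items

-- ===== PORT B =====
-- Source B's nested dict comprehension; with the unique keys Pre_ guarantees a dict
-- comprehension over a dict's items is exactly this map (no overwrite can occur).
def replace_with_lengths_alt (dictionary : List (String × List (String × String))) : List (String × List (String × Int)) :=
  dictionary.map (fun kv => (kv.1, kv.2.map (fun ikv => (ikv.1, (1 : Int)))))

-- ===== PRECONDITION & SPEC =====
-- Pre_ excludes association lists with duplicate keys (outer or inner): those cannot
-- arise from a Python dict, and the ports' dict-reinsertion behaviour there is accidental.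
def Pre_replace_with_lengths (dictionary : List (String × List (String × String))) : Prop :=
  (dictionary.map Prod.fst).Nodup ∧ ∀ kv ∈ dictionary, (kv.2.map Prod.fst).Nodup
instance (dictionary : List (String × List (String × String))) : Decidable (Pre_replace_with_lengths dictionary) := by unfold Pre_replace_with_lengths; infer_instance

def pvWitness_replace_with_lengths : (List (String × List (String × String))) :=
  [("a", [("x", "y"), ("z", "w")]), ("b", [])]

def Spec_replace_with_lengths (dictionary : List (String × List (String × String))) (out : List (String × List (String × Int))) : Prop := out = replace_with_lengths_alt dictionary
instance (dictionary : List (String × List (String × String))) (out : List (String × List (String × Int))) : Decidable (Spec_replace_with_lengths dictionary out) := by unfold Spec_replace_with_lengths; infer_instance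

-- ===== CLAIM (what is proved, stated in full; the proofs are below) =====
def Claim_equal_replace_with_lengths : Prop := ∀ (dictionary : List (String × List (String × String))), Dom_replace_with_lengths dictionary → Pre_replace_with_lengths dictionary → Spec_replace_with_lengths dictionary (replace_with_lengths dictionary)

-- ===== LEMMAS AND PROOFS =====

-- a fresh-key insert loop into an empty dict just lists the pairs in order
lemma rwl_inner_eq (value : List (String × String)) (h : (value.map Prod.fst).Nodup) :
    rwl_inner value = value.map (fun ikv => (ikv.1, (1 : Int))) := by
  unfold rwl_inner
  rw [PySem.Dict.items_foldl_insert_fresh (k := Prod.fst) (v := fun _ => (1 : Int))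
        (d := PySem.Dict.empty) (l := value) (by simp [PySem.Dict.contains_empty]) h]
  simp [PySem.Dict.empty]

-- ===== VERDICT (by name: the statement is the Claim_ definition above) =====
theorem replace_with_lengths_spec : Claim_equal_replace_with_lengths := by
  intro dictionary _ hpre
  unfold Spec_replace_with_lengths replace_with_lengths replace_with_lengths_alt
  rw [PySem.Dict.items_foldl_insert_fresh (k := Prod.fst) (v := fun kv => rwl_inner kv.2)
        (d := PySem.Dict.empty) (l := dictionary) (by simp [PySem.Dict.contains_empty]) hpre.1]
  simp only [PySem.Dict.empty, List.nil_append]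
  exact List.map_congr_left (fun kv hmem => by rw [rwl_inner_eq kv.2 (hpre.2 kv hmem)])
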